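-- pv_equiv track=rewrite | github.com/Azraelki/datastruct | nlp/commom/basic_seg_tool.py | fully_segment
-- ===== SOURCE A (Python) =====
-- def fully_segment(text, dic):
--     """
--     全切分
--     :param text: 文本
--     :param dic: 字典
--     :return: [(word, start, end)]
--     """
--     word_list = []
--     for i in range(len(text)):                  # i 从 0 到text的最后一个字的下标遍历
--         for j in range(i + 1, len(text) + 1):   # j 遍历[i + 1, len(text)]区间
--             word = text[i:j]                    # 取出连续区间[i, j]对应的字符串
--             if word in dic:                     # 如果在词典中，则认为是一个词
--                 word_list.append((word, i, j-1))
--     return word_list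
-- ===== SOURCE B (Python) =====
-- def fully_segment(text, dic):
--     """
--     全切分 — trie-style early termination: precompute the set of all non-empty
--     prefixes of dictionary words; from each start position extend the candidate
--     only while it is still a prefix of some dictionary word, breaking early.
--     """
--     words = set(dic)
--     prefixes = set()
--     for w in words:
--         for k in range(1, len(w) + 1):
--             prefixes.add(w[:k])
--     word_list = []
--     n = len(text)
--     for i in range(n):
--         j = i + 1
--         while j <= n:
--             piece = text[i:j]
--             if piece not in prefixes:
--                 break
--             if piece in words:
--                 word_list.append((piece, i, j - 1))
--             j += 1
--     return word_list
-- ===== Notes on version B (the rewrite author's own statement) =====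
-- stated objective: faster
-- what changed: Replaces the all-pairs (i,j) substring enumeration with a linear list scan per candidate by a precomputed prefix set (trie-style): from each start the candidate is extended only while it is still a prefix of some dictionary word, breaking early, and membership tests use hash sets instead of scanning the dictionary list.
import Mathlib
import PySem

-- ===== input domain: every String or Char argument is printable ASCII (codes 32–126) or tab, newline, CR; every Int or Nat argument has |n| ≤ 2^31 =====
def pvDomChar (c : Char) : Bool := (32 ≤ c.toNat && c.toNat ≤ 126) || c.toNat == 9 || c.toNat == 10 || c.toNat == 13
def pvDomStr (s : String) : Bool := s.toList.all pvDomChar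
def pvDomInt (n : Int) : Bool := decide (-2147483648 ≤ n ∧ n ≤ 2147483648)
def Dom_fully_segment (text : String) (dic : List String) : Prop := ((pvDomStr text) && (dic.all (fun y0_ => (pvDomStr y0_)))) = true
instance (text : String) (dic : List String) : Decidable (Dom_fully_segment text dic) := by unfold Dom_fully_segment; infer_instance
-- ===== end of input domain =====

-- B replaces A's all-pairs (i,j) enumeration with a dictionary-word prefix set used to
-- extend each candidate only while it can still grow into a dictionary word (trie-style
-- early break) and with set membership instead of a list scan; same return value.

-- ===== PORT A =====
def fully_segment (text : String) (dic : List String) : List (String × Int × Int) :=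
  (PySem.List.pyRange 0 (PySem.Str.len text) 1).foldl (fun wordList i =>
    (PySem.List.pyRange (i + 1) (PySem.Str.len text + 1) 1).foldl (fun wordList j =>
      let word := PySem.Str.slice text (some i) (some j)
      if word ∈ dic then wordList ++ [(word, i, j - 1)] else wordList) wordList) []

-- ===== PORT B =====
-- set of all non-empty prefixes w[:k], 1 ≤ k ≤ len(w), of the dictionary words
def fsPrefixes (words : PySem.Set String) : PySem.Set String :=
  words.foldl (fun p w =>
    (PySem.List.pyRange 1 (PySem.Str.len w + 1) 1).foldl (fun p k =>
      PySem.Set.add p (PySem.Str.slice w none (some k))) p) PySem.Set.empty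

-- the inner 'while j <= n: … break' loop of B
def fsScan (text : String) (prefixes words : PySem.Set String) (i n j : Int)
    (acc : List (String × Int × Int)) : List (String × Int × Int) :=
  if _h : j ≤ n then
    let piece := PySem.Str.slice text (some i) (some j)
    if PySem.Set.contains prefixes piece then
      fsScan text prefixes words i n (j + 1)
        (if PySem.Set.contains words piece then acc ++ [(piece, i, j - 1)] else acc)
    else acc
  else acc
termination_by (n + 1 - j).toNat
decreasing_by omega

def fully_segment_alt (text : String) (dic : List String) : List (String × Int × Int) :=
  let words := PySem.Set.ofList dic
  let prefixes := fsPrefixes words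
  let n := PySem.Str.len text
  (PySem.List.pyRange 0 n 1).foldl (fun acc i => fsScan text prefixes words i n (i + 1) acc) []

-- ===== PRECONDITION & SPEC =====
def Spec_fully_segment (text : String) (dic : List String) (out : List (String × Int × Int)) : Prop := out = fully_segment_alt text dic
instance (text : String) (dic : List String) (out : List (String × Int × Int)) : Decidable (Spec_fully_segment text dic out) := by unfold Spec_fully_segment; infer_instance

-- ===== CLAIM (what is proved, stated in full; the proofs are below) =====
def Claim_equal_fully_segment : Prop := ∀ (text : String) (dic : List String), Dom_fully_segment text dic → Spec_fully_segment text dic (fully_segment text dic)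

-- ===== LEMMAS AND PROOFS =====

-- membership in an accumulating fold whose step extends the accumulator
lemma mem_foldl_of_mem_step {α β : Type} (step : List α → β → List α) (Q : β → α → Prop)
    (hstep : ∀ p b y, y ∈ step p b ↔ y ∈ p ∨ Q b y) :
    ∀ (l : List β) (s : List α) (y : α), y ∈ l.foldl step s ↔ y ∈ s ∨ ∃ b ∈ l, Q b y := by
  intro l
  induction l with
  | nil => simp
  | cons b l ih =>
    intro s y
    simp only [List.foldl_cons, ih, hstep, List.mem_cons]
    constructor
    · rintro ((h | h) | ⟨b', hb', h⟩)
      · exact Or.inl h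
      · exact Or.inr ⟨b, Or.inl rfl, h⟩
      · exact Or.inr ⟨b', Or.inr hb', h⟩
    · rintro (h | ⟨b', (rfl | hb'), h⟩)
      · exact Or.inl (Or.inl h)
      · exact Or.inl (Or.inr h)
      · exact Or.inr ⟨b', hb', h⟩

-- what the prefix set contains: exactly the non-empty prefixes of dictionary words
lemma mem_fsPrefixes_iff (dic : List String) (x : String) :
    x ∈ fsPrefixes (PySem.Set.ofList dic) ↔
      ∃ w ∈ dic, x.toList ≠ [] ∧ x.toList <+: w.toList := by
  unfold fsPrefixes
  rw [mem_foldl_of_mem_step _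
        (fun w y => ∃ k : Int, 1 ≤ k ∧ k < PySem.Str.len w + 1 ∧
          y = PySem.Str.slice w none (some k))
        (fun p w y => by
          rw [mem_foldl_of_mem_step _
                (fun k y => y = PySem.Str.slice w none (some k))
                (fun p k y => by rw [PySem.Set.mem_add]) _ p y]
          simp [PySem.List.mem_pyRange_one, and_assoc])]
  simp only [PySem.Set.mem_ofList, PySem.Set.empty, List.not_mem_nil, false_or]
  constructor
  · rintro ⟨w, hw, k, hk1, hk2, rfl⟩
    refine ⟨w, hw, ?_, ?_⟩
    · have : (PySem.Str.slice w none (some k)).toList = w.toList.take k.toNat := by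
        rw [PySem.Str.toList_slice, PySem.Chars.slice_eq_listSlice,
          PySem.List.slice_to _ (by omega)]
      rw [this]
      have hlen := PySem.Str.len_eq w
      intro hnil
      have hl : (w.toList.take k.toNat).length = 0 := by rw [hnil]; rfl
      rw [List.length_take] at hl
      omega
    · rw [PySem.Str.toList_slice, PySem.Chars.slice_eq_listSlice,
        PySem.List.slice_to _ (by omega)]
      exact List.take_prefix _ _
  · rintro ⟨w, hw, hne, hpre⟩
    refine ⟨w, hw, (x.toList.length : Int), by
        have : 0 < x.toList.length := List.length_pos_iff.mpr hne
        omega, by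
        have := List.IsPrefix.length_le hpre
        have hlen := PySem.Str.len_eq w
        omega, ?_⟩
    apply String.toList_inj.mp
    rw [PySem.Str.toList_slice, PySem.Chars.slice_eq_listSlice,
      PySem.List.slice_to _ (by positivity), Int.toNat_natCast]
    exact List.prefix_iff_eq_take.mp hpre

-- the slice text[i:j] as drop/take on the character list (0 ≤ i ≤ j)
lemma toList_slice_text (text : String) (i j : Int) (h0 : 0 ≤ i) (hij : i ≤ j) :
    (PySem.Str.slice text (some i) (some j)).toList
      = (text.toList.drop i.toNat).take (j.toNat - i.toNat) := by
  rw [PySem.Str.toList_slice, PySem.Chars.slice_eq_listSlice,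
    PySem.List.slice_toNat _ h0 (by omega)]

-- key fact: a shorter extension of a start that still reaches a dictionary word is in the prefix set
lemma piece_mem_prefixes (text : String) (dic : List String) (i j j' : Int)
    (h0 : 0 ≤ i) (hij : i < j) (hjj : j ≤ j') (hn : j' ≤ (text.toList.length : Int))
    (hw : PySem.Str.slice text (some i) (some j') ∈ dic) :
    PySem.Str.slice text (some i) (some j) ∈ fsPrefixes (PySem.Set.ofList dic) := by
  rw [mem_fsPrefixes_iff]
  refine ⟨PySem.Str.slice text (some i) (some j'), hw, ?_, ?_⟩
  · rw [toList_slice_text _ _ _ h0 (by omega)]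
    intro hnil
    have hl : ((text.toList.drop i.toNat).take (j.toNat - i.toNat)).length = 0 := by
      rw [hnil]; rfl
    rw [List.length_take, List.length_drop] at hl
    omega
  · rw [toList_slice_text _ _ _ h0 (by omega), toList_slice_text _ _ _ h0 (by omega)]
    have heq : List.take (j.toNat - i.toNat)
        (List.take (j'.toNat - i.toNat) (text.toList.drop i.toNat))
        = List.take (j.toNat - i.toNat) (text.toList.drop i.toNat) := by
      rw [List.take_take]
      congr 1
      omega
    rw [← heq]
    exact List.take_prefix _ _

-- B's scan from position j equals A's remaining inner loop over j..n
lemma scan_eq (text : String) (dic : List String) (i : Int) (h0 : 0 ≤ i) :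
    ∀ (t : Nat) (j : Int) (acc : List (String × Int × Int)), i < j →
      t = ((text.toList.length : Int) + 1 - j).toNat →
      fsScan text (fsPrefixes (PySem.Set.ofList dic)) (PySem.Set.ofList dic) i
          ((text.toList.length : Int)) j acc
        = (PySem.List.pyRange j ((text.toList.length : Int) + 1) 1).foldl
            (fun wordList j =>
              let word := PySem.Str.slice text (some i) (some j)
              if word ∈ dic then wordList ++ [(word, i, j - 1)] else wordList) acc := by
  intro t
  induction t with
  | zero =>
    intro j acc hij ht
    rw [fsScan, dif_neg (by omega), PySem.List.pyRange_one_eq_nil (by omega), List.foldl_nil]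
  | succ t ih =>
    intro j acc hij ht
    rw [fsScan]
    by_cases hjn : j ≤ (text.toList.length : Int)
    · rw [dif_pos hjn]
      simp only []
      by_cases hpre : PySem.Str.slice text (some i) (some j) ∈ fsPrefixes (PySem.Set.ofList dic)
      · rw [if_pos (PySem.Set.contains_iff _ _ |>.mpr hpre)]
        rw [PySem.List.pyRange_one_cons (by omega), List.foldl_cons]
        have hmem : PySem.Set.contains (PySem.Set.ofList dic) (PySem.Str.slice text (some i) (some j))
            = decide (PySem.Str.slice text (some i) (some j) ∈ dic) := by
          by_cases h : PySem.Str.slice text (some i) (some j) ∈ dic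
          · simp only [h, decide_true]
            exact (PySem.Set.contains_iff _ _).mpr ((PySem.Set.mem_ofList _ _).mpr h)
          · simp only [h, decide_false]
            exact Bool.eq_false_iff.mpr fun hc =>
              h ((PySem.Set.mem_ofList _ _).mp ((PySem.Set.contains_iff _ _).mp hc))
        rw [ih (j + 1) _ (by omega) (by omega)]
        congr 1
        simp only [hmem]
        by_cases h : PySem.Str.slice text (some i) (some j) ∈ dic <;> simp [h]
      · rw [if_neg (by rw [Bool.not_eq_true, Bool.eq_false_iff, ne_eq, PySem.Set.contains_iff]; exact hpre)]
        rw [PySem.List.foldl_congr_mem _ _ (fun acc _ => acc) acc ?_, List.foldl_fixed _]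
        intro acc' x hx
        rw [PySem.List.mem_pyRange_one] at hx
        simp only []
        rw [if_neg]
        intro hdic
        exact hpre (piece_mem_prefixes text dic i j x h0 hij hx.1 (by omega) hdic)
    · rw [dif_neg hjn, PySem.List.pyRange_one_eq_nil (by omega), List.foldl_nil]

-- ===== VERDICT (by name: the statement is the Claim_ definition above) =====
theorem fully_segment_spec : Claim_equal_fully_segment := by
  intro text dic _
  unfold Spec_fully_segment fully_segment fully_segment_alt
  simp only [PySem.Str.len_eq]
  apply PySem.List.foldl_congr_mem
  intro acc i hi
  rw [PySem.List.mem_pyRange_one] at hi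
  exact (scan_eq text dic i hi.1 _ (i + 1) acc (by omega) rfl).symm
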